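-- pv_equiv track=rewrite | github.com/hugeping/Brus-16-games | zona-451.py | map2bit
-- ===== SOURCE A (Python) =====
-- MAX_ITEMS = 24
--
-- ITEM_PAD   = 0x0100
--
-- ITEM_ALIEN = 0x0200
--
-- ITEM_DOOR  = 0x0300
--
-- ITEM_SPAWN = 0xff00
--
-- def map2bit(t):
--     r = []
--     items = []
--     x, y = 0, 0
--     px, py = 0, 0
--     ex, ey = -1, -1
--     for l in t.splitlines():
-- #        l = l.strip()
--         if l == "":
--             continue
--         c = 0
--         x = 0
--         for i in l:
--             c >>= 1
--             c |= 0x8000 if i == '#' else 0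
--             if i == '@':
--                 px, py = x, y
--             elif i == 'E':
--                 ex, ey = x, y
--             elif i == '*':
--                 items.append((x, y, ITEM_PAD))
--             elif i == '&':
--                 items.append((x, y, ITEM_SPAWN))
--             elif i == '$':
--                 items.append((x, y, ITEM_ALIEN))
--             elif i == '=' or i == '|':
--                 items.append((x, y, ITEM_DOOR))
--             x += 1
--         r.append(c>>1)
--         y += 1
--     if ex < 0:
--         ex, ey = px, py
--     r.append((py<<4)|px|(ey<<12)|(ex<<8))
--     n = 0
--     for i in items:
--         r.append((i[1]<<4)|i[0]|i[2])
--         n += 1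
--     for i in range(MAX_ITEMS - n):
--         r.append(0)
--     return r
-- ===== SOURCE B (Python) =====
-- MAX_ITEMS = 24
--
-- ITEM_PAD   = 0x0100
-- ITEM_ALIEN = 0x0200
-- ITEM_DOOR  = 0x0300
-- ITEM_SPAWN = 0xff00
--
-- ITEM_CODES = {'*': ITEM_PAD, '&': ITEM_SPAWN, '$': ITEM_ALIEN, '=': ITEM_DOOR, '|': ITEM_DOOR}
--
-- def map2bit(t):
--     grid = [l for l in t.splitlines() if l != ""]
--     # each row as one positional sum: char i of a length-L line contributes 0x8000 >> (L - i) when '#'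
--     rows = [sum(0x8000 >> (len(l) - i) if ch == '#' else 0 for i, ch in enumerate(l)) for l in grid]
--     px, py, ex, ey = 0, 0, -1, -1
--     for y, l in enumerate(grid):
--         for x, ch in enumerate(l):
--             if ch == '@':
--                 px, py = x, y
--             elif ch == 'E':
--                 ex, ey = x, y
--     if ex < 0:
--         ex, ey = px, py
--     items = [(y << 4) | x | ITEM_CODES[ch]
--              for y, l in enumerate(grid) for x, ch in enumerate(l) if ch in ITEM_CODES]
--     return rows + [(py << 4) | px | (ey << 12) | (ex << 8)] + items + [0] * (MAX_ITEMS - len(items))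
-- ===== Notes on version B (the rewrite author's own statement) =====
-- stated objective: alternative
-- what changed: A's single stateful scan (rolling-shift row accumulator, running x/y counters, an item triple list encoded by a later loop) is replaced by independent passes: a direct positional bit formula summed per row, a separate scan for the player/exit coordinates, a dict-driven comprehension that emits already-encoded item words, and a final list assembly with zero padding.
import Mathlib
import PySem

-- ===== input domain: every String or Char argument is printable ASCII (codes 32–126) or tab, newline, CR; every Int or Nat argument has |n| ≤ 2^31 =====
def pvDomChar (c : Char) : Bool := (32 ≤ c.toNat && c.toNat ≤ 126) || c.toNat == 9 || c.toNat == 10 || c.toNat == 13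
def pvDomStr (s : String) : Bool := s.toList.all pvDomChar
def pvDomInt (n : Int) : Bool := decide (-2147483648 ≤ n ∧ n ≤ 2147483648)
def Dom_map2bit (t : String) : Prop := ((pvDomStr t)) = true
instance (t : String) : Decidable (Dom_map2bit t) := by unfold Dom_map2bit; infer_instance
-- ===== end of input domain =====

-- B replaces A's single stateful scan by three independent passes (a positional per-row
-- bit formula, a position scan, an item comprehension) and assembles the list at the end;
-- objective: alternative decomposition (same asymptotic cost).

-- ===== PORT A =====
-- state of the inner character loop: (c, x, items, px, py, ex, ey)
def aInnerStep (y : Int)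
    (s : Int × Int × List (Int × Int × Int) × Int × Int × Int × Int) (i : Char) :
    Int × Int × List (Int × Int × Int) × Int × Int × Int × Int :=
  let (c, x, items, px, py, ex, ey) := s
  let c := c >>> 1
  let c := PySem.Int.bor c (if i = '#' then 0x8000 else 0)
  if i = '@' then (c, x + 1, items, x, y, ex, ey)
  else if i = 'E' then (c, x + 1, items, px, py, x, y)
  else if i = '*' then (c, x + 1, items ++ [(x, y, 0x0100)], px, py, ex, ey)
  else if i = '&' then (c, x + 1, items ++ [(x, y, 0xff00)], px, py, ex, ey)
  else if i = '$' then (c, x + 1, items ++ [(x, y, 0x0200)], px, py, ex, ey)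
  else if i = '=' ∨ i = '|' then (c, x + 1, items ++ [(x, y, 0x0300)], px, py, ex, ey)
  else (c, x + 1, items, px, py, ex, ey)

-- state of the line loop: (r, items, x, y, px, py, ex, ey)
def aLineStep (s : List Int × List (Int × Int × Int) × Int × Int × Int × Int × Int × Int)
    (l : String) : List Int × List (Int × Int × Int) × Int × Int × Int × Int × Int × Int :=
  if l = "" then s
  else
    let (r, items, _x, y, px, py, ex, ey) := s
    let (c, x, items, px, py, ex, ey) := l.toList.foldl (aInnerStep y) (0, 0, items, px, py, ex, ey)
    (r ++ [c >>> 1], items, x, y + 1, px, py, ex, ey)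

def map2bit (t : String) : List Int :=
  let st := (PySem.Str.splitlines t).foldl aLineStep ([], [], 0, 0, 0, 0, -1, -1)
  let (r, items, _x, _y, px, py, ex, ey) := st
  let (ex, ey) := if ex < 0 then (px, py) else (ex, ey)
  let r := r ++ [PySem.Int.bor (PySem.Int.bor (PySem.Int.bor (py <<< 4) px) (ey <<< 12)) (ex <<< 8)]
  let rn := items.foldl (fun (s : List Int × Int) i =>
      (s.1 ++ [PySem.Int.bor (PySem.Int.bor ((i.2.1 : Int) <<< 4) i.1) i.2.2], s.2 + 1)) (r, 0)
  (PySem.List.pyRange 0 (24 - rn.2) 1).foldl (fun r _ => r ++ [(0 : Int)]) rn.1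

-- ===== PORT B =====
def ITEM_CODES : PySem.Dict Char Int :=
  PySem.Dict.ofList [('*', 0x0100), ('&', 0xff00), ('$', 0x0200), ('=', 0x0300), ('|', 0x0300)]

-- row as one positional sum: char i of a length-L line adds 0x8000 >> (L - i) when '#'
-- (the Python shift amount len(l) - i is ≥ 1, so the Nat conversion .toNat is exact)
def bRow (l : String) : Int :=
  ((PySem.List.enumerate l.toList 0).map (fun p =>
      if p.2 = '#' then (0x8000 : Int) >>> ((l.toList.length : Int) - p.1).toNat else 0)).sum

-- body of B's inner position loop (y is the row index, xc = (x, ch))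
def bPosChar (y : Int) (s : Int × Int × Int × Int) (xc : Int × Char) : Int × Int × Int × Int :=
  let (px, py, ex, ey) := s
  if xc.2 = '@' then (xc.1, y, ex, ey)
  else if xc.2 = 'E' then (px, py, xc.1, y)
  else (px, py, ex, ey)

def bPosLine (s : Int × Int × Int × Int) (yl : Int × String) : Int × Int × Int × Int :=
  (PySem.List.enumerate yl.2.toList 0).foldl (bPosChar yl.1) s

def bPos (grid : List String) : Int × Int × Int × Int :=
  (PySem.List.enumerate grid 0).foldl bPosLine (0, 0, -1, -1)

-- one line of B's item comprehension
def bItemLine (yl : Int × String) : List Int :=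
  (PySem.List.enumerate yl.2.toList 0).filterMap (fun xc =>
    (ITEM_CODES.get? xc.2).map (fun v => PySem.Int.bor (PySem.Int.bor ((yl.1 : Int) <<< 4) xc.1) v))

def bItems (grid : List String) : List Int :=
  (PySem.List.enumerate grid 0).flatMap bItemLine

def map2bit_alt (t : String) : List Int :=
  let grid := (PySem.Str.splitlines t).filter (fun l => l != "")
  let rows := grid.map bRow
  let (px, py, ex, ey) := bPos grid
  let (ex, ey) := if ex < 0 then (px, py) else (ex, ey)
  let items := bItems grid
  rows ++ [PySem.Int.bor (PySem.Int.bor (PySem.Int.bor (py <<< 4) px) (ey <<< 12)) (ex <<< 8)]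
    ++ items ++ PySem.List.pyRepeat [0] (24 - (items.length : Int))

-- ===== PRECONDITION & SPEC =====
def Spec_map2bit (t : String) (out : List Int) : Prop := out = map2bit_alt t
instance (t : String) (out : List Int) : Decidable (Spec_map2bit t out) := by unfold Spec_map2bit; infer_instance

-- ===== CLAIM (what is proved, stated in full; the proofs are below) =====
def Claim_equal_map2bit : Prop := ∀ (t : String), Dom_map2bit t → Spec_map2bit t (map2bit t)

-- ===== LEMMAS AND PROOFS =====

theorem pvLorHighBit (a : Nat) (h : a < 32768) : a ||| 32768 = a + 32768 := by
  apply Nat.eq_of_testBit_eq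
  intro j
  rw [Nat.testBit_lor]
  rcases lt_trichotomy j 15 with hj | hj | hj
  · have e : (32768 : Nat) = 2 ^ (14 - j) * 2 * 2 ^ j := by
      rw [Nat.mul_assoc, ← Nat.pow_succ', ← Nat.pow_add]
      have : 14 - j + (j + 1) = 15 := by omega
      rw [this]
    simp only [Nat.testBit_eq_decide_div_mod_eq]
    rw [e, Nat.add_mul_div_right _ _ (Nat.two_pow_pos j),
      Nat.mul_div_cancel _ (Nat.two_pow_pos j), Nat.add_mul_mod_self_right, Nat.mul_mod_left]
    simp
  · subst hj
    have h1 : a / 2 ^ 15 = 0 := Nat.div_eq_of_lt (by norm_num; omega)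
    have h2 : (a + 32768) / 2 ^ 15 = 1 := by
      have e : (32768 : Nat) = 1 * 2 ^ 15 := by norm_num
      rw [e, Nat.add_mul_div_right _ _ (Nat.two_pow_pos 15), h1]
    simp only [Nat.testBit_eq_decide_div_mod_eq]
    rw [h1, h2]
    norm_num
  · have hb : (65536 : Nat) ≤ 2 ^ j := by
      calc (65536:Nat) = 2 ^ 16 := by norm_num
        _ ≤ 2 ^ j := Nat.pow_le_pow_right (by norm_num) (by omega)
    rw [Nat.testBit_lt_two_pow (by omega), Nat.testBit_lt_two_pow (by omega),
      Nat.testBit_lt_two_pow (by omega)]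
    rfl

theorem pvAddHighShift (x : Nat) (h : x < 32768) (s : Nat) :
    (x + 32768) >>> s = x >>> s + 32768 >>> s := by
  simp only [Nat.shiftRight_eq_div_pow]
  by_cases hs : s ≤ 15
  · have e : (32768 : Nat) = 2 ^ (15 - s) * 2 ^ s := by
      rw [← Nat.pow_add]
      have : 15 - s + s = 15 := by omega
      rw [this]
    rw [e, Nat.add_mul_div_right _ _ (Nat.two_pow_pos s), Nat.mul_div_cancel _ (Nat.two_pow_pos s)]
  · have hb : (65536 : Nat) ≤ 2 ^ s := by
      calc (65536:Nat) = 2 ^ 16 := by norm_num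
        _ ≤ 2 ^ s := Nat.pow_le_pow_right (by norm_num) (by omega)
    rw [Nat.div_eq_of_lt (by omega), Nat.div_eq_of_lt (by omega), Nat.div_eq_of_lt (by omega)]
def cFoldI (c : Int) : List Char → Int
  | [] => c
  | ch :: rest => cFoldI (PySem.Int.bor (c >>> 1) (if ch = '#' then 0x8000 else 0)) rest

def cFoldN (c : Nat) : List Char → Nat
  | [] => c
  | ch :: rest => cFoldN ((c >>> 1) ||| (if ch = '#' then 32768 else 0)) rest

def rowSumN : List Char → Nat
  | [] => 0
  | ch :: rest => (if ch = '#' then 32768 >>> (rest.length + 1) else 0) + rowSumN rest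

theorem cFoldI_natCast (chars : List Char) (c : Nat) :
    cFoldI (c : Int) chars = (cFoldN c chars : Int) := by
  induction chars generalizing c with
  | nil => rfl
  | cons ch rest ih =>
    simp only [cFoldI, cFoldN]
    rw [show ((c : Int) >>> 1) = ((c >>> 1 : Nat) : Int) from rfl]
    by_cases h : ch = '#'
    · simp only [h, if_true, if_false, reduceIte]
      rw [show ((0x8000 : Int)) = ((32768 : Nat) : Int) from rfl, PySem.Int.bor_natCast, ih]
    · simp only [h, if_true, if_false, reduceIte]
      rw [show ((0 : Int)) = ((0 : Nat) : Int) from rfl, PySem.Int.bor_natCast, ih]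
theorem cFoldN_spec (chars : List Char) (c : Nat) (h : c < 65536) :
    cFoldN c chars >>> 1 = c >>> (chars.length + 1) + rowSumN chars := by
  induction chars generalizing c with
  | nil => simp [cFoldN, rowSumN]
  | cons ch rest ih =>
    have hc1 : c >>> 1 < 32768 := by rw [Nat.shiftRight_one]; omega
    simp only [cFoldN, rowSumN, List.length_cons]
    by_cases hch : ch = '#'
    · simp only [hch, if_true]
      rw [pvLorHighBit _ hc1, ih _ (by omega), pvAddHighShift _ hc1,
        ← Nat.shiftRight_add]
      have : 1 + (rest.length + 1) = rest.length + 1 + 1 := by omega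
      rw [this]
      omega
    · simp only [hch, if_false, Nat.or_zero]
      rw [ih _ (by omega), ← Nat.shiftRight_add]
      have : 1 + (rest.length + 1) = rest.length + 1 + 1 := by omega
      rw [this]
      omega

-- ===== row-value characterisation =====
theorem bRow_sum (chars : List Char) (k L : Nat) (hL : L = k + chars.length) :
    ((PySem.List.enumerate chars (k : Int)).map (fun p =>
        if p.2 = '#' then (0x8000 : Int) >>> ((L : Int) - p.1).toNat else 0)).sum
      = (rowSumN chars : Int) := by
  induction chars generalizing k L with
  | nil => simp [rowSumN, PySem.List.enumerate_nil]
  | cons ch rest ih =>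
    rw [PySem.List.enumerate_cons, List.map_cons, List.sum_cons]
    have hk : (((k : Int)) + 1) = ((k + 1 : Nat) : Int) := by push_cast; ring
    rw [hk, ih (k + 1) L (by simp at hL ⊢; omega)]
    have hsub : (((L : Int)) - k).toNat = rest.length + 1 := by
      simp at hL; omega
    simp only [rowSumN, hsub]
    by_cases h : ch = '#'
    · simp only [h, if_true, reduceIte]
      rw [show ((0x8000 : Int) >>> (rest.length + 1)) = ((32768 >>> (rest.length + 1) : Nat) : Int) from rfl]
      push_cast
      try ring
    · simp only [h, if_false, reduceIte]
      push_cast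
      try ring

theorem rowA_eq_bRow (l : String) : (cFoldI 0 l.toList) >>> 1 = bRow l := by
  have hsum := bRow_sum l.toList 0 l.toList.length (by omega)
  simp only [Nat.cast_zero] at hsum
  unfold bRow
  rw [hsum, show (0 : Int) = ((0 : Nat) : Int) from rfl, cFoldI_natCast,
    show (((cFoldN 0 l.toList : Nat) : Int) >>> 1) = ((cFoldN 0 l.toList >>> 1 : Nat) : Int) from rfl,
    cFoldN_spec _ _ (by norm_num), Nat.zero_shiftRight]
  simp

-- ===== A's inner character loop, decomposed =====
def itemsOf (y x : Int) : List Char → List (Int × Int × Int)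
  | [] => []
  | ch :: rest =>
    (if ch = '@' then [] else if ch = 'E' then []
     else if ch = '*' then [(x, y, 0x0100)] else if ch = '&' then [(x, y, 0xff00)]
     else if ch = '$' then [(x, y, 0x0200)] else if ch = '=' ∨ ch = '|' then [(x, y, 0x0300)]
     else []) ++ itemsOf y (x + 1) rest

def posFold (y x : Int) (s : Int × Int × Int × Int) : List Char → Int × Int × Int × Int
  | [] => s
  | ch :: rest => posFold y (x + 1)
      (if ch = '@' then (x, y, s.2.2) else if ch = 'E' then (s.1, s.2.1, x, y) else s) rest

theorem inner_spec (chars : List Char) (y c x : Int) (items : List (Int × Int × Int))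
    (px py ex ey : Int) :
    chars.foldl (aInnerStep y) (c, x, items, px, py, ex, ey) =
      (cFoldI c chars, x + chars.length, items ++ itemsOf y x chars,
        posFold y x (px, py, ex, ey) chars) := by
  induction chars generalizing c x items px py ex ey with
  | nil => simp [cFoldI, itemsOf, posFold]
  | cons ch rest ih =>
    simp only [List.foldl_cons, cFoldI, itemsOf, posFold, aInnerStep]
    split_ifs with h1 h2 h3 h4 h5 h6 <;>
      rw [ih] <;>
      refine Prod.ext ?_ (Prod.ext ?_ (Prod.ext ?_ ?_)) <;>
      simp [List.append_assoc] <;> push_cast <;> omega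

-- ===== B's position pass = A's position component =====
theorem posFold_eq (chars : List Char) (y k : Int) (s : Int × Int × Int × Int) :
    (PySem.List.enumerate chars k).foldl (bPosChar y) s = posFold y k s chars := by
  induction chars generalizing k s with
  | nil => simp [PySem.List.enumerate_nil, posFold]
  | cons ch rest ih =>
    rw [PySem.List.enumerate_cons, List.foldl_cons, posFold, ih]
    rcases s with ⟨px, py, ex, ey⟩
    simp only [bPosChar]

def gridPos (y : Int) (s : Int × Int × Int × Int) : List String → Int × Int × Int × Int
  | [] => s
  | l :: ls => gridPos (y + 1) (posFold y 0 s l.toList) ls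

theorem bPos_eq (grid : List String) (k : Int) (s : Int × Int × Int × Int) :
    (PySem.List.enumerate grid k).foldl bPosLine s = gridPos k s grid := by
  induction grid generalizing k s with
  | nil => simp [PySem.List.enumerate_nil, gridPos]
  | cons l ls ih =>
    rw [PySem.List.enumerate_cons, List.foldl_cons, gridPos, ← ih]
    congr 1
    exact posFold_eq l.toList k 0 s

-- ===== B's item pass = A's item component, already encoded =====
def encTriple (i : Int × Int × Int) : Int :=
  PySem.Int.bor (PySem.Int.bor ((i.2.1 : Int) <<< 4) i.1) i.2.2

theorem codes_get (ch : Char) :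
    ITEM_CODES.get? ch =
      (if ch = '*' then some 0x0100 else if ch = '&' then some 0xff00
       else if ch = '$' then some 0x0200 else if ch = '=' then some 0x0300
       else if ch = '|' then some 0x0300 else none) := by
  by_cases h1 : ch = '*'
  · subst h1; decide
  by_cases h2 : ch = '&'
  · subst h2; simp [h1]; decide
  by_cases h3 : ch = '$'
  · subst h3; simp [h1, h2]; decide
  by_cases h4 : ch = '='
  · subst h4; simp [h1, h2, h3]; decide
  by_cases h5 : ch = '|'
  · subst h5; simp [h1, h2, h3, h4]; decide
  have hmk : ITEM_CODES = PySem.Dict.mk [('*', 0x0100), ('&', 0xff00), ('$', 0x0200), ('=', 0x0300), ('|', 0x0300)] := by decide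
  simp [hmk, PySem.Dict.get?_mk_cons, PySem.Dict.get?, beq_iff_eq,
    Ne.symm h1, Ne.symm h2, Ne.symm h3, Ne.symm h4, Ne.symm h5, h1, h2, h3, h4, h5]

theorem itemLine_eq (chars : List Char) (y k : Int) :
    (PySem.List.enumerate chars k).filterMap (fun xc =>
        (ITEM_CODES.get? xc.2).map (fun v =>
          PySem.Int.bor (PySem.Int.bor ((y : Int) <<< 4) xc.1) v)) =
      (itemsOf y k chars).map encTriple := by
  induction chars generalizing k with
  | nil => simp [PySem.List.enumerate_nil, itemsOf]
  | cons ch rest ih =>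
    rw [PySem.List.enumerate_cons, List.filterMap_cons, codes_get]
    simp only [itemsOf]
    by_cases h1 : ch = '@'
    · subst h1; simp [ih]
    by_cases h2 : ch = 'E'
    · subst h2; simp [h1, ih]
    by_cases h3 : ch = '*'
    · subst h3; simp [encTriple, ih]
    by_cases h4 : ch = '&'
    · subst h4; simp [encTriple, ih]
    by_cases h5 : ch = '$'
    · subst h5; simp [encTriple, ih]
    by_cases h6 : ch = '='
    · subst h6; simp [encTriple, ih]
    by_cases h7 : ch = '|'
    · subst h7; simp [encTriple, ih]
    simp [h1, h2, h3, h4, h5, h6, h7, ih]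

def gridItems (y : Int) : List String → List (Int × Int × Int)
  | [] => []
  | l :: ls => itemsOf y 0 l.toList ++ gridItems (y + 1) ls

theorem bItems_eq (grid : List String) (k : Int) :
    (PySem.List.enumerate grid k).flatMap bItemLine = (gridItems k grid).map encTriple := by
  induction grid generalizing k with
  | nil => simp [PySem.List.enumerate_nil, gridItems]
  | cons l ls ih =>
    rw [PySem.List.enumerate_cons, List.flatMap_cons, gridItems, List.map_append, ← ih]
    congr 1
    exact itemLine_eq l.toList k 0

-- ===== A's item-encoding loop and zero padding =====
theorem encode_fold (items : List (Int × Int × Int)) (r : List Int) (n : Int) :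
    items.foldl (fun (s : List Int × Int) i =>
        (s.1 ++ [PySem.Int.bor (PySem.Int.bor ((i.2.1 : Int) <<< 4) i.1) i.2.2], s.2 + 1)) (r, n) =
      (r ++ items.map encTriple, n + items.length) := by
  induction items generalizing r n with
  | nil => simp
  | cons i rest ih =>
    rw [List.foldl_cons, ih]
    refine Prod.ext ?_ ?_ <;> simp [encTriple, List.append_assoc] <;> push_cast <;> omega

theorem pad_fold (m : Int) (r : List Int) :
    (PySem.List.pyRange 0 m 1).foldl (fun r _ => r ++ [(0 : Int)]) r =
      r ++ List.replicate m.toNat (0 : Int) := by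
  have h := PySem.List.foldl_append_singleton_eq_map (l := PySem.List.pyRange 0 m 1)
    (f := fun _ => (0 : Int)) (acc := r)
  rw [h, List.map_const']
  congr 1
  rw [PySem.List.length_pyRange_one]
  norm_num

-- ===== outer loop =====
theorem foldA_skip_blank (lines : List String)
    (s : List Int × List (Int × Int × Int) × Int × Int × Int × Int × Int × Int) :
    lines.foldl aLineStep s = (lines.filter (fun l => l != "")).foldl aLineStep s := by
  induction lines generalizing s with
  | nil => rfl
  | cons l ls ih =>
    by_cases h : l = ""
    · rw [List.foldl_cons, show aLineStep s l = s by simp [aLineStep, h], ih]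
      simp [h]
    · rw [List.foldl_cons, List.filter_cons_of_pos (by simp [h]), List.foldl_cons, ih]

def xLast (x : Int) : List String → Int
  | [] => x
  | l :: ls => xLast (l.toList.length : Int) ls

theorem outer_spec (grid : List String) (r : List Int) (items : List (Int × Int × Int))
    (x y px py ex ey : Int) (hg : ∀ l ∈ grid, l ≠ "") :
    grid.foldl aLineStep (r, items, x, y, px, py, ex, ey) =
      (r ++ grid.map (fun l => (cFoldI 0 l.toList) >>> 1),
        items ++ gridItems y grid,
        xLast x grid,
        y + grid.length,
        gridPos y (px, py, ex, ey) grid) := by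
  induction grid generalizing r items x y px py ex ey with
  | nil => simp [gridItems, gridPos, xLast]
  | cons l ls ih =>
    have hl : l ≠ "" := hg l (by simp)
    rw [List.foldl_cons, show aLineStep (r, items, x, y, px, py, ex, ey) l =
        (r ++ [(cFoldI 0 l.toList) >>> 1], items ++ itemsOf y 0 l.toList,
          (l.toList.length : Int), y + 1, posFold y 0 (px, py, ex, ey) l.toList) by
      simp [aLineStep, hl, inner_spec]]
    rw [ih _ _ _ _ _ _ _ _ (fun l hl => hg l (by simp [hl]))]
    simp only [gridItems, gridPos, xLast, List.map_cons, List.length_cons]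
    refine Prod.ext ?_ (Prod.ext ?_ (Prod.ext ?_ (Prod.ext ?_ ?_))) <;>
      simp [List.append_assoc] <;> push_cast <;> try omega

-- ===== VERDICT (by name: the statement is the Claim_ definition above) =====
theorem map2bit_spec : Claim_equal_map2bit := by
  intro t _
  unfold Spec_map2bit
  show map2bit t = map2bit_alt t
  have hg : ∀ l ∈ (PySem.Str.splitlines t).filter (fun l => l != ""), l ≠ "" := by
    intro l hl
    rcases List.mem_filter.mp hl with ⟨_, h2⟩
    simpa using h2
  have hrow : ((PySem.Str.splitlines t).filter (fun l => l != "")).map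
      (fun l => (cFoldI 0 l.toList) >>> 1) =
      ((PySem.Str.splitlines t).filter (fun l => l != "")).map bRow :=
    List.map_congr_left (fun l _ => rowA_eq_bRow l)
  rw [map2bit, map2bit_alt, foldA_skip_blank, outer_spec _ _ _ _ _ _ _ _ _ hg]
  simp only [List.nil_append, hrow]
  rw [show bPos ((PySem.Str.splitlines t).filter (fun l => l != "")) =
        gridPos 0 (0, 0, -1, -1) ((PySem.Str.splitlines t).filter (fun l => l != "")) from
      bPos_eq _ 0 _,
    show bItems ((PySem.Str.splitlines t).filter (fun l => l != "")) =
        (gridItems 0 ((PySem.Str.splitlines t).filter (fun l => l != ""))).map encTriple from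
      bItems_eq _ 0]
  set q := gridPos 0 (0, 0, -1, -1) ((PySem.Str.splitlines t).filter (fun l => l != "")) with hq
  obtain ⟨px, py, ex, ey⟩ := q
  simp only []
  rw [encode_fold, pad_fold, PySem.List.pyRepeat_singleton]
  simp [List.append_assoc, List.length_map]
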